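-- pv_equiv track=rewrite | github.com/MrBrantCode/unitest_baseline | mut_generate/mist_train_cf/cf_63705/solution.py | sort_odds_evens
-- ===== SOURCE A (Python) =====
-- def sort_odds_evens(array):
--     odds = sorted([x for x in array if x % 2 == 1])
--     evens = sorted([x for x in array if x % 2 == 0])
--     result = []
--     for x in array:
--         if x % 2 == 1:
--             result.append(odds.pop(0))
--         else:
--             result.append(evens.pop(0))
--     return result
-- ===== SOURCE B (Python) =====
-- def sort_odds_evens(array):
--     odd_pairs = [(i, x) for i, x in enumerate(array) if x % 2 == 1]
--     even_pairs = [(i, x) for i, x in enumerate(array) if x % 2 == 0]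
--     result = list(array)
--     for i, v in zip([i for i, _ in odd_pairs], sorted([x for _, x in odd_pairs])):
--         result[i] = v
--     for i, v in zip([i for i, _ in even_pairs], sorted([x for _, x in even_pairs])):
--         result[i] = v
--     return result
-- ===== Notes on version B (the rewrite author's own statement) =====
-- stated objective: faster
-- what changed: A pops sorted odd/even queues from the front (linear pop(0)) while re-walking the array; B records the odd and even index/value pairs once via enumerate and scatters the two sorted value lists back into a copy of the array by index assignment.
import Mathlib
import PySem

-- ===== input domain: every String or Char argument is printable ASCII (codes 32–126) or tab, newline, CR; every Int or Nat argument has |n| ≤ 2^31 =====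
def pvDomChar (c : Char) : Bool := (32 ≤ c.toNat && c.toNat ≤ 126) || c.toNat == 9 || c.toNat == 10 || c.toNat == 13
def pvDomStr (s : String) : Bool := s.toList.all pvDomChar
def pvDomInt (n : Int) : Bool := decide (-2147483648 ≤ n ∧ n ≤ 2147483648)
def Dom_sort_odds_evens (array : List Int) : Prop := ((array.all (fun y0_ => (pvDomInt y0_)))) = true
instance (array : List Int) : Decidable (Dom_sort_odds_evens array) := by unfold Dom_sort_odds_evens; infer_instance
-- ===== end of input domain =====

-- B replaces A's pop-from-front parity loop (quadratic via pop(0)) by an enumerate/filter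
-- index table plus two sorted scatter passes (objective: faster, O(n log n)).

-- ===== PORT A =====
-- the 'for x in array' loop; odds.pop(0)/evens.pop(0) is modelled by headI/tail
-- (Python's IndexError on an empty pop is unreachable: the queues hold exactly the
-- odd/even elements of the array being walked)
def sortOddsEvensLoopA (arr odds evens : List Int) : List Int :=
  match arr with
  | [] => []
  | x :: xs =>
    if PySem.Int.mod x 2 == 1 then
      odds.headI :: sortOddsEvensLoopA xs odds.tail evens
    else
      evens.headI :: sortOddsEvensLoopA xs odds evens.tail

def sort_odds_evens (array : List Int) : List Int :=
  sortOddsEvensLoopA array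
    (PySem.List.sorted (array.filter (fun x => PySem.Int.mod x 2 == 1)) (fun x => x) false)
    (PySem.List.sorted (array.filter (fun x => PySem.Int.mod x 2 == 0)) (fun x => x) false)

-- ===== PORT B =====
-- the 'for i, v in zip(...): result[i] = v' scatter loop
def scatterB (res : List Int) (ps : List (Int × Int)) : List Int :=
  match ps with
  | [] => res
  | (i, v) :: rest => scatterB (PySem.List.pySetD res i v) rest

def sort_odds_evens_alt (array : List Int) : List Int :=
  let oddPairs := (PySem.List.enumerate array 0).filter (fun p => PySem.Int.mod p.2 2 == 1)
  let evenPairs := (PySem.List.enumerate array 0).filter (fun p => PySem.Int.mod p.2 2 == 0)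
  let r1 := scatterB array
    (List.zip (oddPairs.map Prod.fst) (PySem.List.sorted (oddPairs.map Prod.snd) (fun x => x) false))
  scatterB r1
    (List.zip (evenPairs.map Prod.fst) (PySem.List.sorted (evenPairs.map Prod.snd) (fun x => x) false))

-- ===== PRECONDITION & SPEC =====
def Spec_sort_odds_evens (array : List Int) (out : List Int) : Prop := out = sort_odds_evens_alt array
instance (array : List Int) (out : List Int) : Decidable (Spec_sort_odds_evens array out) := by unfold Spec_sort_odds_evens; infer_instance

-- ===== CLAIM (what is proved, stated in full; the proofs are below) =====
def Claim_equal_sort_odds_evens : Prop := ∀ (array : List Int), Dom_sort_odds_evens array → Spec_sort_odds_evens array (sort_odds_evens array)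

-- ===== LEMMAS AND PROOFS =====

lemma mod_two_cases (x : Int) : PySem.Int.mod x 2 = 0 ∨ PySem.Int.mod x 2 = 1 := by
  have h1 := PySem.Int.mod_nonneg x (b := 2) (by omega)
  have h2 := PySem.Int.mod_lt x (b := 2) (by omega)
  omega

lemma enumerate_shift (xs : List Int) (s : Int) :
    PySem.List.enumerate xs (s + 1) =
      (PySem.List.enumerate xs s).map (fun p => (p.1 + 1, p.2)) := by
  induction xs generalizing s with
  | nil => simp [PySem.List.enumerate_nil]
  | cons x xs ih =>
    rw [PySem.List.enumerate_cons, PySem.List.enumerate_cons, ih (s + 1)]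
    simp

lemma filter_map_shift (l : List (Int × Int)) (q : Int → Bool) :
    ((l.map (fun p => (p.1 + 1, p.2))).filter (fun p => q p.2)) =
      (l.filter (fun p => q p.2)).map (fun p => (p.1 + 1, p.2)) := by
  rw [List.filter_map]; rfl

lemma map_snd_filter_enumerate (xs : List Int) (s : Int) (q : Int → Bool) :
    (((PySem.List.enumerate xs s).filter (fun p => q p.2)).map Prod.snd) = xs.filter q := by
  induction xs generalizing s with
  | nil => simp [PySem.List.enumerate_nil]
  | cons x xs ih =>
    simp only [PySem.List.enumerate_cons, List.filter_cons]
    by_cases h : q x <;> simp [h, ih (s + 1)]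

lemma enumerate_fst_nonneg (xs : List Int) (s : Int) (hs : 0 ≤ s) :
    ∀ p ∈ PySem.List.enumerate xs s, 0 ≤ p.1 := by
  intro p hp
  rcases (PySem.List.mem_enumerate_iff xs s p).1 hp with ⟨k, hk, rfl⟩
  simp; omega

lemma scatter_shift (a : Int) (t : List Int) (ps : List (Int × Int))
    (h : ∀ q ∈ ps, 0 ≤ q.1) :
    scatterB (a :: t) (ps.map (fun p => (p.1 + 1, p.2))) = a :: scatterB t ps := by
  induction ps generalizing a t with
  | nil => rfl
  | cons q ps ih =>
    obtain ⟨i, v⟩ := q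
    have hi : 0 ≤ i := h (i, v) (by simp)
    have hset : PySem.List.pySetD (a :: t) (i + 1) v = a :: PySem.List.pySetD t i v := by
      rw [PySem.List.pySetD_of_nonneg _ _ (by omega), PySem.List.pySetD_of_nonneg _ _ hi]
      have : (i + 1).toNat = i.toNat + 1 := by omega
      simp [this]
    simp only [List.map_cons, scatterB, hset]
    exact ih a (PySem.List.pySetD t i v) (fun q hq => h q (by simp [hq]))

lemma scatter_set_zero (x : Int) (t : List Int) (v : Int) :
    PySem.List.pySetD (x :: t) 0 v = v :: t := by
  rw [PySem.List.pySetD_of_nonneg _ _ (by omega)]; rfl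

lemma main_lemma (xs os es : List Int)
    (ho : os.length = (xs.filter (fun x => PySem.Int.mod x 2 == 1)).length)
    (he : es.length = (xs.filter (fun x => PySem.Int.mod x 2 == 0)).length) :
    scatterB
      (scatterB xs
        (List.zip (((PySem.List.enumerate xs 0).filter (fun p => PySem.Int.mod p.2 2 == 1)).map Prod.fst) os))
      (List.zip (((PySem.List.enumerate xs 0).filter (fun p => PySem.Int.mod p.2 2 == 0)).map Prod.fst) es)
    = sortOddsEvensLoopA xs os es := by
  induction xs generalizing os es with
  | nil => simp [PySem.List.enumerate_nil, scatterB, sortOddsEvensLoopA]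
  | cons x xs ih =>
    have hnn := enumerate_fst_nonneg xs 0 le_rfl
    have hshift := enumerate_shift xs 0
    rw [zero_add] at hshift
    have hzipnn : ∀ (q : Int → Bool) (l : List Int) (p : Int × Int),
        p ∈ List.zip (((PySem.List.enumerate xs 0).filter (fun p => q p.2)).map Prod.fst) l → 0 ≤ p.1 := by
      intro q l p hp
      have h1 := (List.of_mem_zip hp).1
      rcases List.mem_map.1 h1 with ⟨r, hr, hrfst⟩
      have := hnn r (List.mem_filter.1 hr).1
      omega
    have hcompfst : ∀ (l : List (Int × Int)),
        l.map (Prod.fst ∘ (fun p => (p.1 + 1, p.2))) = (l.map Prod.fst).map (· + 1) := by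
      intro l; simp [List.map_map, Function.comp]
    have hzipshift : ∀ (idx : List Int) (vals : List Int),
        List.zip (idx.map (· + 1)) vals = (List.zip idx vals).map (fun p => (p.1 + 1, p.2)) := by
      intro idx vals
      rw [List.zip_map_left]; rfl
    rcases mod_two_cases x with hx | hx
    · -- even head
      have hodd : (PySem.Int.mod x 2 == 1) = false := by rw [hx]; decide
      have heven : (PySem.Int.mod x 2 == 0) = true := by rw [hx]; decide
      rw [List.filter_cons_of_neg (by simpa using hodd)] at ho
      rw [List.filter_cons_of_pos (by simpa using heven)] at he
      obtain ⟨e, es', rfl⟩ : ∃ e es', es = e :: es' := by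
        rcases es with _ | ⟨e, es'⟩
        · simp at he
        · exact ⟨e, es', rfl⟩
      rw [PySem.List.enumerate_cons]
      rw [List.filter_cons_of_neg (by simpa using hodd),
          List.filter_cons_of_pos (by simpa using heven)]
      rw [zero_add, hshift,
          filter_map_shift _ (fun y => PySem.Int.mod y 2 == 1),
          filter_map_shift _ (fun y => PySem.Int.mod y 2 == 0)]
      rw [List.map_cons, List.map_map, List.map_map, hcompfst, hcompfst]
      rw [show ((0 : Int), x).1 = 0 from rfl, List.zip_cons_cons]
      rw [hzipshift, hzipshift]
      rw [scatter_shift x xs ((((PySem.List.enumerate xs 0).filter (fun p => PySem.Int.mod p.2 2 == 1)).map Prod.fst).zip os) (hzipnn (fun y => PySem.Int.mod y 2 == 1) os)]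
      show scatterB (PySem.List.pySetD (x :: scatterB xs ((((PySem.List.enumerate xs 0).filter (fun p => PySem.Int.mod p.2 2 == 1)).map Prod.fst).zip os)) 0 e) _ = _
      rw [scatter_set_zero]
      rw [scatter_shift e (scatterB xs ((((PySem.List.enumerate xs 0).filter (fun p => PySem.Int.mod p.2 2 == 1)).map Prod.fst).zip os)) ((((PySem.List.enumerate xs 0).filter (fun p => PySem.Int.mod p.2 2 == 0)).map Prod.fst).zip es') (hzipnn (fun y => PySem.Int.mod y 2 == 0) es')]
      rw [sortOddsEvensLoopA]
      simp only [hodd, Bool.false_eq_true, if_false, List.headI, List.tail]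
      rw [ih os es' ho (by simpa using he)]
    · -- odd head
      have hodd : (PySem.Int.mod x 2 == 1) = true := by rw [hx]; decide
      have heven : (PySem.Int.mod x 2 == 0) = false := by rw [hx]; decide
      rw [List.filter_cons_of_pos (by simpa using hodd)] at ho
      rw [List.filter_cons_of_neg (by simpa using heven)] at he
      obtain ⟨o, os', rfl⟩ : ∃ o os', os = o :: os' := by
        rcases os with _ | ⟨o, os'⟩
        · simp at ho
        · exact ⟨o, os', rfl⟩
      rw [PySem.List.enumerate_cons]
      rw [List.filter_cons_of_pos (by simpa using hodd),
          List.filter_cons_of_neg (by simpa using heven)]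
      rw [zero_add, hshift,
          filter_map_shift _ (fun y => PySem.Int.mod y 2 == 1),
          filter_map_shift _ (fun y => PySem.Int.mod y 2 == 0)]
      rw [List.map_cons, List.map_map, List.map_map, hcompfst, hcompfst]
      rw [show ((0 : Int), x).1 = 0 from rfl, List.zip_cons_cons]
      rw [hzipshift, hzipshift]
      show scatterB (scatterB (PySem.List.pySetD (x :: xs) 0 o) (((((PySem.List.enumerate xs 0).filter (fun p => PySem.Int.mod p.2 2 == 1)).map Prod.fst).zip os').map (fun p => (p.1 + 1, p.2)))) _ = _
      rw [scatter_set_zero]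
      rw [scatter_shift o xs ((((PySem.List.enumerate xs 0).filter (fun p => PySem.Int.mod p.2 2 == 1)).map Prod.fst).zip os') (hzipnn (fun y => PySem.Int.mod y 2 == 1) os')]
      rw [scatter_shift o (scatterB xs ((((PySem.List.enumerate xs 0).filter (fun p => PySem.Int.mod p.2 2 == 1)).map Prod.fst).zip os')) ((((PySem.List.enumerate xs 0).filter (fun p => PySem.Int.mod p.2 2 == 0)).map Prod.fst).zip es) (hzipnn (fun y => PySem.Int.mod y 2 == 0) es)]
      rw [sortOddsEvensLoopA]
      simp only [hodd, if_true, List.headI, List.tail]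
      rw [ih os' es (by simpa using ho) he]

-- ===== VERDICT (by name: the statement is the Claim_ definition above) =====
theorem sort_odds_evens_spec : Claim_equal_sort_odds_evens := by
  intro array _
  unfold Spec_sort_odds_evens sort_odds_evens sort_odds_evens_alt
  simp only []
  rw [map_snd_filter_enumerate array 0 (fun x => PySem.Int.mod x 2 == 1),
      map_snd_filter_enumerate array 0 (fun x => PySem.Int.mod x 2 == 0)]
  rw [main_lemma]
  · rw [PySem.List.length_sorted]
  · rw [PySem.List.length_sorted]
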